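-- pv_equiv track=rewrite | github.com/jichunwei/MyGitHub-1 | saigon/rat/u/zdcli/set_verify_mgmt_if.py | verify_cli_set_get
-- ===== SOURCE A (Python) =====
-- def verify_cli_set_get(cli_set,get):
--     temp = {}
--     map = key_map()
--     for key,value in map.items():
--         if key in cli_set.keys():
--             temp[value] = cli_set[key]
--
--     for key in temp:
--         if temp[key] != get[key]:
--             return("FAIL, CLI Set[%s]:[%s] is different Get[%s]" %(key,temp[key],get[key]))
--
-- def key_map():
--     map = {'ip_addr':'IP Address',
--            'net_mask':'Netmask',
--            'vlan_id':'VLAN'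
--            }
--     return map
-- ===== SOURCE B (Python) =====
-- def key_map():
--     map = {'ip_addr':'IP Address',
--            'net_mask':'Netmask',
--            'vlan_id':'VLAN'
--            }
--     return map
--
-- def verify_cli_set_get(cli_set, get):
--     return next(
--         ("FAIL, CLI Set[%s]:[%s] is different Get[%s]" % (name, cli_set[key], get[name])
--          for key, name in key_map().items()
--          if key in cli_set and cli_set[key] != get[name]),
--         None)
-- ===== Notes on version B (the rewrite author's own statement) =====
-- stated objective: simpler
-- what changed: Drops the intermediate temp dict and the second loop: a single pass over key_map().items() (a next() over a generator) returns the FAIL string at the first mismatch.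
import Mathlib
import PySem

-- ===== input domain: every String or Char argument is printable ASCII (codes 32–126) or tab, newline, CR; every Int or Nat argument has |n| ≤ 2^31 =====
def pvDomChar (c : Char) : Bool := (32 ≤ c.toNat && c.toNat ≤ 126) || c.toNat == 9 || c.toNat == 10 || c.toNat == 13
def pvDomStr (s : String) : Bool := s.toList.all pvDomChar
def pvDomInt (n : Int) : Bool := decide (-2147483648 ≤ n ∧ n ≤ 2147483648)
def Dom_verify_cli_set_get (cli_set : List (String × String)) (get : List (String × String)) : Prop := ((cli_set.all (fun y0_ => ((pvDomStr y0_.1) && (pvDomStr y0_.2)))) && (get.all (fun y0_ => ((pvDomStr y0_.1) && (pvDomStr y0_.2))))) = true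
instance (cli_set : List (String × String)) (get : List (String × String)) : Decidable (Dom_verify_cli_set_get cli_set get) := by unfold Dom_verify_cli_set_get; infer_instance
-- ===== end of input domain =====

-- B drops A's intermediate temp dict and second loop: one pass over key_map() returning the first mismatch (simpler; return value only).

-- key_map(), shared helper of both Python versions
def keyMapItems : List (String × String) :=
  [("ip_addr", "IP Address"), ("net_mask", "Netmask"), ("vlan_id", "VLAN")]

-- ===== PORT A =====
-- A's second loop: 'for key in temp: if temp[key] != get[key]: return …'.
-- get[key] with key missing raises KeyError in Python (g.get? = none); those inputs are outside Pre_.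
def vcsLoopA (temp g : PySem.Dict String String) : List String → Option String
  | [] => none
  | k :: rest =>
    match g.get? k with
    | none => none  -- Python: KeyError; excluded by Pre_
    | some gv =>
      if temp.getD k "" != gv then
        some ("FAIL, CLI Set[" ++ k ++ "]:[" ++ temp.getD k "" ++ "] is different Get[" ++ gv ++ "]")
      else vcsLoopA temp g rest

def verify_cli_set_get (cli_set : List (String × String)) (get : List (String × String)) : Option String :=
  let cli := PySem.Dict.ofList cli_set
  let g := PySem.Dict.ofList get
  let temp := keyMapItems.foldl
    (fun t kv => if cli.contains kv.1 then t.insert kv.2 (cli.getD kv.1 "") else t)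
    PySem.Dict.empty
  vcsLoopA temp g temp.keys

-- ===== PORT B =====
-- B: next() over a generator = first some of the one pass over key_map().items()
def verify_cli_set_get_alt (cli_set : List (String × String)) (get : List (String × String)) : Option String :=
  let cli := PySem.Dict.ofList cli_set
  let g := PySem.Dict.ofList get
  keyMapItems.findSome? (fun kv =>
    if cli.contains kv.1 then
      match g.get? kv.2 with
      | none => none  -- Python: KeyError; excluded by Pre_
      | some gv =>
        if cli.getD kv.1 "" != gv then
          some ("FAIL, CLI Set[" ++ kv.2 ++ "]:[" ++ cli.getD kv.1 "" ++ "] is different Get[" ++ gv ++ "]")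
        else none
    else none)

-- ===== PRECONDITION & SPEC =====
-- Pre_ excludes exactly the inputs on which Python A raises KeyError: some mapped key is in cli_set
-- but its display name is missing from get, and this entry is reached (no earlier mismatch returned first).
-- B raises the same KeyError there, so nothing A returns on is excluded.
def Pre_verify_cli_set_get (cli_set : List (String × String)) (get : List (String × String)) : Prop :=
  ¬ (((PySem.Dict.ofList cli_set).contains "ip_addr" = true ∧
        (PySem.Dict.ofList get).get? "IP Address" = none)
   ∨ ((PySem.Dict.ofList cli_set).contains "net_mask" = true ∧
        (PySem.Dict.ofList get).get? "Netmask" = none ∧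
        ((PySem.Dict.ofList cli_set).contains "ip_addr" = true →
          (PySem.Dict.ofList get).get? "IP Address" = some ((PySem.Dict.ofList cli_set).getD "ip_addr" "")))
   ∨ ((PySem.Dict.ofList cli_set).contains "vlan_id" = true ∧
        (PySem.Dict.ofList get).get? "VLAN" = none ∧
        ((PySem.Dict.ofList cli_set).contains "ip_addr" = true →
          (PySem.Dict.ofList get).get? "IP Address" = some ((PySem.Dict.ofList cli_set).getD "ip_addr" "")) ∧
        ((PySem.Dict.ofList cli_set).contains "net_mask" = true →
          (PySem.Dict.ofList get).get? "Netmask" = some ((PySem.Dict.ofList cli_set).getD "net_mask" ""))))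

instance (cli_set : List (String × String)) (get : List (String × String)) : Decidable (Pre_verify_cli_set_get cli_set get) := by unfold Pre_verify_cli_set_get; infer_instance

def pvWitness_verify_cli_set_get : (List (String × String)) × (List (String × String)) :=
  ([("ip_addr", "1.2.3.4"), ("net_mask", "255.0.0.0")],
   [("IP Address", "1.2.3.4"), ("Netmask", "255.255.0.0"), ("VLAN", "1")])

def Spec_verify_cli_set_get (cli_set : List (String × String)) (get : List (String × String)) (out : Option String) : Prop := out = verify_cli_set_get_alt cli_set get
instance (cli_set : List (String × String)) (get : List (String × String)) (out : Option String) : Decidable (Spec_verify_cli_set_get cli_set get out) := by unfold Spec_verify_cli_set_get; infer_instance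

-- ===== CLAIM (what is proved, stated in full; the proofs are below) =====
def Claim_equal_verify_cli_set_get : Prop := ∀ (cli_set : List (String × String)) (get : List (String × String)), Dom_verify_cli_set_get cli_set get → Pre_verify_cli_set_get cli_set get → Spec_verify_cli_set_get cli_set get (verify_cli_set_get cli_set get)

-- ===== LEMMAS AND PROOFS / VERDICT =====
set_option maxHeartbeats 4000000 in
theorem verify_cli_set_get_spec : Claim_equal_verify_cli_set_get := by
  intro cs g _ hpre
  unfold Spec_verify_cli_set_get verify_cli_set_get verify_cli_set_get_alt keyMapItems
  unfold Pre_verify_cli_set_get at hpre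
  push_neg at hpre
  by_cases h1 : (PySem.Dict.ofList cs).contains "ip_addr" <;>
  by_cases h2 : (PySem.Dict.ofList cs).contains "net_mask" <;>
  by_cases h3 : (PySem.Dict.ofList cs).contains "vlan_id" <;>
  simp only [h1, h2, h3, List.foldl, if_true, if_false, Bool.false_eq_true] <;>
  simp only [vcsLoopA, List.findSome?, PySem.Dict.insert, PySem.Dict.empty, PySem.Dict.keys,
    List.map, h1, h2, h3] <;>
  cases hg1 : (PySem.Dict.ofList g).get? "IP Address" <;>
  cases hg2 : (PySem.Dict.ofList g).get? "Netmask" <;>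
  cases hg3 : (PySem.Dict.ofList g).get? "VLAN" <;>
  simp_all [vcsLoopA] <;> split_ifs <;> simp_all [PySem.Dict.get?, PySem.Dict.getD]
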